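-- pv_equiv track=rewrite | github.com/oPisiti/Advent-Of-Code | 2021/10/10+.py | get_syntax_score
-- ===== SOURCE A (Python) =====
-- def get_syntax_score(string: str) -> int:
--     points={
--         ")": 1,
--         "]": 2,
--         "}": 3,
--         ">": 4,
--     }
--
--     score = 0
--     for char in string:
--         score *= 5
--         score += points[char]
--
--     return score
-- ===== SOURCE B (Python) =====
-- def get_syntax_score(string: str) -> int:
--     points = {
--         ")": 1,
--         "]": 2,
--         "}": 3,
--         ">": 4,
--     }
--
--     total = 0
--     weight = 1
--     for char in reversed(string):
--         total += points[char] * weight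
--         weight *= 5
--
--     return total
-- ===== Notes on version B (the rewrite author's own statement) =====
-- stated objective: alternative
-- what changed: Replaces the left-to-right Horner accumulator (score = score*5 + points[c]) with a right-to-left pass that maintains an explicit positional weight (power of 5) and sums points[c]*weight.
import Mathlib
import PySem

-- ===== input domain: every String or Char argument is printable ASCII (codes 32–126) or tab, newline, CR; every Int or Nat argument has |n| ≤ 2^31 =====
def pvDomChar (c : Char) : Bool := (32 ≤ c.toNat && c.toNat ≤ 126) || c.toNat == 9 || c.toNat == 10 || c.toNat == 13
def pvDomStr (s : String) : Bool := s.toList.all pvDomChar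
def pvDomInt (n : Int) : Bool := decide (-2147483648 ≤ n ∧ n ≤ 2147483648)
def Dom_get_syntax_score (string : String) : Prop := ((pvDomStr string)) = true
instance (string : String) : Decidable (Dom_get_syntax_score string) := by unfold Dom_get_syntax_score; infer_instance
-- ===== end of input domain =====

-- B: same score computed right-to-left with an explicit positional weight instead of Horner's accumulator; equal on Pre_ (no unknown bracket chars).
-- ===== PORT A =====
-- the dict 'points' of A and B
def gssPoints : PySem.Dict Char Int :=
  ((((PySem.Dict.empty).insert ')' 1).insert ']' 2).insert '}' 3).insert '>' 4

-- Python raises KeyError for a char outside the dict; those inputs are excluded by Pre_; the port uses default 0 there.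
def get_syntax_score (string : String) : Int :=
  string.toList.foldl (fun score char => score * 5 + gssPoints.getD char 0) 0

-- ===== PORT B =====
def get_syntax_score_alt (string : String) : Int :=
  (string.toList.reverse.foldl
    (fun (tw : Int × Int) char => (tw.1 + gssPoints.getD char 0 * tw.2, tw.2 * 5)) (0, 1)).1

-- ===== PRECONDITION & SPEC =====
-- Pre_ excludes exactly the strings containing a character outside the points dict, on which Python's dict lookup raises KeyError.
def Pre_get_syntax_score (string : String) : Prop :=
  (string.toList.all (fun c => c == ')' || c == ']' || c == '}' || c == '>')) = true
instance (string : String) : Decidable (Pre_get_syntax_score string) := by unfold Pre_get_syntax_score; infer_instance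
def pvWitness_get_syntax_score : String := ")"

def Spec_get_syntax_score (string : String) (out : Int) : Prop := out = get_syntax_score_alt string
instance (string : String) (out : Int) : Decidable (Spec_get_syntax_score string out) := by unfold Spec_get_syntax_score; infer_instance

-- ===== CLAIM (what is proved, stated in full; the proofs are below) =====
def Claim_equal_get_syntax_score : Prop := ∀ (string : String), Dom_get_syntax_score string → Pre_get_syntax_score string → Spec_get_syntax_score string (get_syntax_score string)

-- ===== LEMMAS AND PROOFS =====

-- B's fold over a list r, started at (t, w), yields t + w * (Horner value of r.reverse).
theorem gss_alt_fold (r : List Char) : ∀ (t w : Int),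
    (r.foldl (fun (tw : Int × Int) char => (tw.1 + gssPoints.getD char 0 * tw.2, tw.2 * 5)) (t, w)).1
      = t + w * r.reverse.foldl (fun score char => score * 5 + gssPoints.getD char 0) 0 := by
  induction r with
  | nil => simp
  | cons c r' ih =>
    intro t w
    simp only [List.foldl_cons, List.reverse_cons, List.foldl_append, List.foldl_nil, ih]
    ring

-- ===== VERDICT (by name: the statement is the Claim_ definition above) =====
theorem get_syntax_score_spec : Claim_equal_get_syntax_score := by
  intro s _ _
  unfold Spec_get_syntax_score get_syntax_score get_syntax_score_alt
  rw [gss_alt_fold, List.reverse_reverse]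
  ring
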